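-- pv_equiv track=rewrite | github.com/hongbozheng/artificial-intelligence | hmm_pos_tagging/viterbi_3.py | getTagCount
-- ===== SOURCE A (Python) =====
-- def getTagCount(train):
--     TAG = []
--     tag_count = {}
--     start_tag_count = {}
--
--     for sentence in train:
--         for word, tag in sentence:
--             if tag in tag_count:
--                 tag_count[tag] += 1
--                 if tag == 'START':
--                     start_tag_count[tag] += 1
--             else:
--                 tag_count[tag] = 1
--                 if tag == 'START':
--                     start_tag_count[tag] = 1
--                 else:
--                     start_tag_count[tag] = 0
--                 TAG.append(tag)
--
--     return TAG, tag_count, start_tag_count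
-- ===== SOURCE B (Python) =====
-- def getTagCount(train):
--     # Count-per-distinct-tag strategy: flatten once, order the distinct tags by
--     # their first-occurrence position, then count each tag with list.count.
--     tags = [tag for sentence in train for _, tag in sentence]
--     TAG = sorted(set(tags), key=tags.index)
--     tag_count = {t: tags.count(t) for t in TAG}
--     start_tag_count = {t: tags.count(t) if t == 'START' else 0 for t in TAG}
--     return TAG, tag_count, start_tag_count
-- ===== Notes on version B (the rewrite author's own statement) =====
-- stated objective: alternative
-- what changed: Replaces A's single incremental pass that maintains TAG, tag_count and start_tag_count via dict-membership branching with a count-per-distinct-tag algorithm: flatten the tags, order the distinct tags by sorting set(tags) on first-occurrence index, then build each dict by counting every distinct tag with list.count.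
import Mathlib
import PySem

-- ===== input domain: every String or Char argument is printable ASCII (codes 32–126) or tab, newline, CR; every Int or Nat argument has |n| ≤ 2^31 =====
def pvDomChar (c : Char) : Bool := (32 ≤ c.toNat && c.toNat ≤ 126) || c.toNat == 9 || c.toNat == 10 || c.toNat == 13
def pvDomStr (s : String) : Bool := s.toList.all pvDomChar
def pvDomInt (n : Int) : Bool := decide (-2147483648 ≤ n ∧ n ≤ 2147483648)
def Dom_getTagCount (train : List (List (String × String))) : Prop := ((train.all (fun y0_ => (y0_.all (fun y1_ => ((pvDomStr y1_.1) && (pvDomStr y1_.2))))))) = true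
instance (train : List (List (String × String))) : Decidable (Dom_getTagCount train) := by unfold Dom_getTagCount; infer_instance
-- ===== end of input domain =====

-- B replaces A's incremental single-pass counting by flatten + sort the distinct tags by first
-- occurrence + count each distinct tag with list.count; same outputs, an alternative algorithm.

-- ===== PORT A =====
-- one iteration of A's inner loop body, on state (TAG, tag_count, start_tag_count) and the tag
def stepA (st : List String × PySem.Dict String Int × PySem.Dict String Int) (tag : String) :
    List String × PySem.Dict String Int × PySem.Dict String Int :=
  if st.2.1.contains tag then
    (st.1, st.2.1.insert tag (st.2.1.getD tag 0 + 1),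
      if tag == "START" then st.2.2.insert tag (st.2.2.getD tag 0 + 1) else st.2.2)
  else
    (st.1 ++ [tag], st.2.1.insert tag 1,
      if tag == "START" then st.2.2.insert tag 1 else st.2.2.insert tag 0)

def getTagCount (train : List (List (String × String))) : List String × (List (String × Int)) × (List (String × Int)) :=
  let st := train.foldl (fun st sentence => sentence.foldl (fun st wt => stepA st wt.2) st)
              ([], PySem.Dict.empty, PySem.Dict.empty)
  (st.1, st.2.1.items, st.2.2.items)

-- ===== PORT B =====
-- tags.index t never raises here (every t comes from set(tags)), so '.getD 0' is exact
def getTagCount_alt (train : List (List (String × String))) : List String × (List (String × Int)) × (List (String × Int)) :=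
  let tags := train.flatMap (fun sentence => sentence.map (fun wt => wt.2))
  let TAG := PySem.List.sorted (PySem.Set.ofList tags) (fun t => (PySem.List.index? tags t).getD 0) false
  let tagCount := PySem.Dict.ofList (TAG.map (fun t => (t, (PySem.List.count tags t : Int))))
  let startTagCount := PySem.Dict.ofList (TAG.map (fun t => (t, if t == "START" then (PySem.List.count tags t : Int) else 0)))
  (TAG, tagCount.items, startTagCount.items)

-- ===== PRECONDITION & SPEC =====
def Spec_getTagCount (train : List (List (String × String))) (out : List String × (List (String × Int)) × (List (String × Int))) : Prop := out = getTagCount_alt train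
instance (train : List (List (String × String))) (out : List String × (List (String × Int)) × (List (String × Int))) : Decidable (Spec_getTagCount train out) := by unfold Spec_getTagCount; infer_instance

-- ===== CLAIM (what is proved, stated in full; the proofs are below) =====
def Claim_equal_getTagCount : Prop := ∀ (train : List (List (String × String))), Dom_getTagCount train → Spec_getTagCount train (getTagCount train)

-- ===== LEMMAS AND PROOFS =====

-- the value start_tag_count holds for tag k after processing the tag list ts
def gfun (ts : List String) (k : String) : String × Int :=
  (k, if k == "START" then (ts.count k : Int) else 0)

-- getD on a dict of the shape built here
lemma getD_mk_map {f : String → Int} {S : List String} {k : String} (hk : k ∈ S) :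
    (PySem.Dict.mk (S.map (fun x => (x, f x)))).getD k 0 = f k := by
  induction S with
  | nil => cases hk
  | cons a S ih =>
    simp only [List.map_cons]
    by_cases h : a = k
    · subst h
      simp [PySem.Dict.getD, PySem.Dict.get?]
    · have hk' : k ∈ S := by
        rcases List.mem_cons.mp hk with h' | h'
        · exact absurd h'.symm h
        · exact h'
      simpa [PySem.Dict.getD, PySem.Dict.get?, h] using ih hk'

-- contains on a dict of the shape built here
lemma contains_mk_map {f : String → Int} {S : List String} {k : String} :
    (PySem.Dict.mk (S.map (fun x => (x, f x)))).contains k = S.contains k := by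
  simp [PySem.Dict.contains, List.any_map, Function.comp_def, List.any_beq']

-- insert on a present key rewrites exactly the entries with that key
lemma insert_mk_map {f : String → Int} {S : List String} {k : String} {v : Int}
    (hk : k ∈ S) :
    (PySem.Dict.mk (S.map (fun x => (x, f x)))).insert k v
      = PySem.Dict.mk (S.map (fun x => (x, if x = k then v else f x))) := by
  have hc : (PySem.Dict.mk (S.map (fun x => (x, f x)))).contains k = true := by
    simp [hk]
  simp only [PySem.Dict.insert, hc, if_pos, List.map_map]
  congr 1
  refine List.map_congr_left (fun x _ => ?_)
  by_cases h : x = k <;> simp [h]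

-- insert of an absent key appends
lemma insert_absent {l : List (String × Int)} {k : String} {v : Int}
    (h : (PySem.Dict.mk l).contains k = false) :
    (PySem.Dict.mk l).insert k v = PySem.Dict.mk (l ++ [(k, v)]) := by
  simp [PySem.Dict.insert, h]

-- gfun as an explicit lambda (for rewriting under List.map)
lemma gfun_eq (ts : List String) :
    gfun ts = fun x => (x, if x == "START" then (ts.count x : Int) else 0) := rfl

-- the three base lemmas specialized to gfun (beta-reduced forms)
lemma getD_mk_gfun (ts : List String) {S : List String} {k : String} (hk : k ∈ S) :
    (PySem.Dict.mk (S.map (gfun ts))).getD k 0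
      = if k == "START" then (ts.count k : Int) else 0 := by
  have h := getD_mk_map (f := fun x => if x == "START" then (ts.count x : Int) else 0)
    (S := S) (k := k) hk
  rw [gfun_eq]
  simpa using h

lemma contains_mk_gfun (ts : List String) {S : List String} {k : String} :
    (PySem.Dict.mk (S.map (gfun ts))).contains k = S.contains k := by
  have h := contains_mk_map (f := fun x => if x == "START" then (ts.count x : Int) else 0)
    (S := S) (k := k)
  rw [gfun_eq]
  simpa using h

lemma insert_mk_gfun (ts : List String) {S : List String} {k : String} {v : Int} (hk : k ∈ S) :
    (PySem.Dict.mk (S.map (gfun ts))).insert k v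
      = PySem.Dict.mk (S.map (fun x =>
          (x, if x = k then v else if x == "START" then (ts.count x : Int) else 0))) := by
  have h := insert_mk_map (f := fun x => if x == "START" then (ts.count x : Int) else 0)
    (S := S) (k := k) (v := v) hk
  rw [gfun_eq]
  simpa using h

-- third component of A's state: an already-seen "START" tag bumps its entry in place
lemma third_seen_start (ts : List String) (ht : "START" ∈ ts) :
    (PySem.Dict.mk ((PySem.Set.ofList ts).map (gfun ts))).insert "START"
        ((PySem.Dict.mk ((PySem.Set.ofList ts).map (gfun ts))).getD "START" 0 + 1)
      = PySem.Dict.mk ((PySem.Set.ofList ts).map (gfun (ts ++ ["START"]))) := by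
  have hkS : "START" ∈ PySem.Set.ofList ts := (PySem.Set.mem_ofList ts _).mpr ht
  rw [getD_mk_gfun ts hkS, insert_mk_gfun ts hkS]
  congr 1
  refine List.map_congr_left (fun x hx => ?_)
  by_cases hx' : x = "START"
  · subst hx'; simp [gfun, List.count_append]
  · simp [gfun, hx', show (x == "START") = false by simpa using hx']

-- third component: an already-seen non-"START" tag leaves it unchanged
lemma third_seen_other (ts : List String) {t : String} (hst : t ≠ "START") :
    (PySem.Set.ofList ts).map (gfun ts)
      = (PySem.Set.ofList ts).map (gfun (ts ++ [t])) := by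
  refine List.map_congr_left (fun x hx => ?_)
  by_cases hx' : x = "START"
  · subst hx'
    simp [gfun, List.count_append, hst]
  · simp [gfun, show (x == "START") = false by simpa using hx']

-- third component: a fresh tag appends its entry
lemma third_new (ts : List String) {t : String} (ht : t ∉ ts) (v : Int)
    (hv : v = if t == "START" then 1 else 0) :
    (PySem.Dict.mk ((PySem.Set.ofList ts).map (gfun ts))).insert t v
      = PySem.Dict.mk (((PySem.Set.ofList ts) ++ [t]).map (gfun (ts ++ [t]))) := by
  have htS : t ∉ PySem.Set.ofList ts := fun h => ht ((PySem.Set.mem_ofList ts t).mp h)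
  have hcD : (PySem.Dict.mk ((PySem.Set.ofList ts).map (gfun ts))).contains t = false := by
    rw [contains_mk_gfun]
    simpa [List.contains_iff_mem] using htS
  rw [insert_absent hcD]
  congr 1
  have hmap : (PySem.Set.ofList ts).map (gfun (ts ++ [t]))
      = (PySem.Set.ofList ts).map (gfun ts) := by
    refine List.map_congr_left (fun x hx => ?_)
    have hxts : x ∈ ts := (PySem.Set.mem_ofList ts x).mp hx
    have hxt : t ≠ x := fun e => ht (e ▸ hxts)
    simp [gfun, List.count_append, hxt]
  have hgt : gfun (ts ++ [t]) t = (t, if t == "START" then (1 : Int) else 0) := by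
    simp [gfun, List.count_append, List.count_eq_zero.mpr ht]
  rw [List.map_append, List.map_singleton, hmap, hgt, hv]

-- main loop invariant for A over the flattened tag list
lemma loopA (ts : List String) :
    ts.foldl stepA ([], PySem.Dict.empty, PySem.Dict.empty)
      = (PySem.Set.ofList ts, PySem.Dict.counter ts,
         PySem.Dict.mk ((PySem.Set.ofList ts).map (gfun ts))) := by
  induction ts using List.reverseRecOn with
  | nil => rfl
  | append_singleton ts t ih =>
    rw [List.foldl_append, ih, List.foldl_cons, List.foldl_nil]
    have hS : PySem.Set.ofList (ts ++ [t]) = (PySem.Set.ofList ts).add t := by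
      simp [PySem.Set.ofList, List.foldl_append]
    by_cases ht : t ∈ ts
    · have hc : (PySem.Dict.counter ts).contains t = true := by
        simp [PySem.Dict.contains_counter, ht]
      have hadd : (PySem.Set.ofList ts).add t = PySem.Set.ofList ts := by
        simp [PySem.Set.add, (PySem.Set.mem_ofList ts t).mpr ht]
      rw [hS, hadd, PySem.Dict.counter_append_singleton]
      by_cases hst : t = "START"
      · subst hst
        simp only [stepA, hc, if_pos, PySem.Dict.modify,
          show (("START" : String) == "START") = true from rfl]
        exact Prod.ext rfl (Prod.ext rfl (third_seen_start ts ht))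
      · simp only [stepA, hc, if_pos, PySem.Dict.modify,
          show (t == "START") = false by simpa using hst, Bool.false_eq_true, if_neg,
          not_false_eq_true]
        exact Prod.ext rfl (Prod.ext rfl (congrArg PySem.Dict.mk (third_seen_other ts hst)))
    · have hc : (PySem.Dict.counter ts).contains t = false := by
        simp [PySem.Dict.contains_counter, ht]
      have htS : t ∉ PySem.Set.ofList ts := fun h => ht ((PySem.Set.mem_ofList ts t).mp h)
      have hadd : (PySem.Set.ofList ts).add t = PySem.Set.ofList ts ++ [t] := by
        simp [PySem.Set.add, htS]
      rw [hS, hadd, PySem.Dict.counter_append_singleton]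
      have hC2 : (PySem.Dict.counter ts).modify t 0 (fun x => x + 1)
          = (PySem.Dict.counter ts).insert t 1 := by
        simp [PySem.Dict.modify, PySem.Dict.getD_counter, List.count_eq_zero.mpr ht]
      rw [hC2]
      by_cases hst : t = "START"
      · subst hst
        simp only [stepA, hc, Bool.false_eq_true, if_neg, not_false_eq_true,
          show (("START" : String) == "START") = true from rfl, if_pos]
        exact Prod.ext rfl (Prod.ext rfl (third_new ts ht 1 rfl))
      · simp only [stepA, hc, Bool.false_eq_true, if_neg, not_false_eq_true,
          show (t == "START") = false by simpa using hst]
        exact Prod.ext rfl (Prod.ext rfl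
          (third_new ts ht 0 (by simp [show (t == "START") = false by simpa using hst])))

-- Pairwise can be weakened pointwise on members
lemma pairwise_imp_mem {l : List String} {R S : String → String → Prop} (h : l.Pairwise R)
    (hm : ∀ a ∈ l, ∀ b ∈ l, R a b → S a b) : l.Pairwise S := by
  induction l with
  | nil => exact List.Pairwise.nil
  | cons x xs ih =>
    rcases List.pairwise_cons.mp h with ⟨hx, hxs⟩
    exact List.pairwise_cons.mpr ⟨fun b hb => hm x (by simp) b (by simp [hb]) (hx b hb),
      ih hxs (fun a ha b hb => hm a (by simp [ha]) b (by simp [hb]))⟩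

-- a member's first-occurrence index is below the length
lemma index_getD_lt_length {ts : List String} {x : String} (hx : x ∈ ts) :
    (PySem.List.index? ts x).getD 0 < ts.length := by
  rcases Option.isSome_iff_exists.mp ((PySem.List.index?_isSome_iff ts x).mpr hx) with ⟨k, hk⟩
  rcases PySem.List.getElem_of_index?_eq_some hk with ⟨hlt, -, -⟩
  rw [hk]
  simpa using hlt

-- set(ts) lists the distinct tags in strictly increasing order of first occurrence in ts
lemma ofList_pairwise_index (ts : List String) :
    (PySem.Set.ofList ts).Pairwise
      (fun a b => (PySem.List.index? ts a).getD 0 < (PySem.List.index? ts b).getD 0) := by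
  induction ts using List.reverseRecOn with
  | nil => simp [PySem.Set.ofList]
  | append_singleton ts t ih =>
    have hS : PySem.Set.ofList (ts ++ [t]) = (PySem.Set.ofList ts).add t := by
      simp [PySem.Set.ofList, List.foldl_append]
    have hkeep : ∀ x ∈ ts, PySem.List.index? (ts ++ [t]) x = PySem.List.index? ts x :=
      fun x hx => PySem.List.index?_append_of_mem [t] hx
    by_cases ht : t ∈ ts
    · have hadd : (PySem.Set.ofList ts).add t = PySem.Set.ofList ts := by
        simp [PySem.Set.add, (PySem.Set.mem_ofList ts t).mpr ht]
      rw [hS, hadd]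
      refine pairwise_imp_mem ih (fun a ha b hb hab => ?_)
      rw [hkeep a ((PySem.Set.mem_ofList ts a).mp ha), hkeep b ((PySem.Set.mem_ofList ts b).mp hb)]
      exact hab
    · have htS : t ∉ PySem.Set.ofList ts := fun h => ht ((PySem.Set.mem_ofList ts t).mp h)
      have hadd : (PySem.Set.ofList ts).add t = PySem.Set.ofList ts ++ [t] := by
        simp [PySem.Set.add, htS]
      rw [hS, hadd]
      refine List.pairwise_append.mpr ⟨?_, by simp, ?_⟩
      · refine pairwise_imp_mem ih (fun a ha b hb hab => ?_)
        rw [hkeep a ((PySem.Set.mem_ofList ts a).mp ha), hkeep b ((PySem.Set.mem_ofList ts b).mp hb)]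
        exact hab
      · intro a ha b hb
        have hat : a ∈ ts := (PySem.Set.mem_ofList ts a).mp ha
        have hbt : b = t := by simpa using hb
        subst hbt
        rw [hkeep a hat, PySem.List.index?_append_singleton_self ts b ht]
        simpa using index_getD_lt_length hat
-- B's sort leaves set(tags) in place: its elements are already strictly ordered by the key
lemma sorted_ofList_index (ts : List String) :
    PySem.List.sorted (PySem.Set.ofList ts) (fun t => (PySem.List.index? ts t).getD 0) false
      = PySem.Set.ofList ts :=
  PySem.List.sorted_eq_of_perm_of_pairwise_lt _ _ _ (List.Perm.refl _) (ofList_pairwise_index ts)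

-- a dict comprehension over nodup keys is the literal dict
lemma ofList_mk {S : List String} {f : String → Int} (hnd : S.Nodup) :
    PySem.Dict.ofList (S.map (fun x => (x, f x))) = PySem.Dict.mk (S.map (fun x => (x, f x))) := by
  have hfold : PySem.Dict.ofList (S.map (fun x => (x, f x)))
      = S.foldl (fun d x => d.insert x (f x)) PySem.Dict.empty := by
    show (S.map (fun x => (x, f x))).foldl (fun d p => d.insert p.1 p.2) PySem.Dict.empty = _
    rw [List.foldl_map]
  have hfresh := PySem.Dict.items_foldl_insert_fresh S (fun x => x) f PySem.Dict.empty
    (by intro a _; rfl) (by simp [hnd])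
  simp only [] at hfresh
  apply PySem.Dict.ext
  rw [hfold]
  simpa using hfresh

-- ===== VERDICT (by name: the statement is the Claim_ definition above) =====
theorem getTagCount_spec : Claim_equal_getTagCount := by
  intro train _
  unfold Spec_getTagCount getTagCount getTagCount_alt
  have hA : train.foldl (fun st sentence => sentence.foldl (fun st wt => stepA st wt.2) st)
      ([], PySem.Dict.empty, PySem.Dict.empty)
      = (train.flatMap (fun sentence => sentence.map (fun wt => wt.2))).foldl stepA
          ([], PySem.Dict.empty, PySem.Dict.empty) := by
    rw [List.foldl_flatMap]
    simp [List.foldl_map]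
  set tags := train.flatMap (fun sentence => sentence.map (fun wt => wt.2)) with htags
  have hnd := PySem.Set.nodup_ofList tags
  simp only [hA, loopA, sorted_ofList_index]
  rw [ofList_mk hnd, ofList_mk hnd]
  refine Prod.ext rfl (Prod.ext ?_ ?_)
  · simp [PySem.Dict.items_counter]
  · rfl
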